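-- pv_equiv track=rewrite | github.com/kherrera1517/Python | CS5/Black/hw8pr2.py | markov_model
-- ===== SOURCE A (Python) =====
-- PUNCTUATION = [".", "!", "?"]
--
-- def dollarify(wordList, k):
--     if wordList == [] or k == 0:
--         return wordList
--     returnList = []
--     ind = 0 #keeps track of the beginning of a sentence
--     for i in range(len(wordList)):
--         if wordList[i][-1] in PUNCTUATION:
--             returnList += ['$']*k + wordList[ind:i+1]
--             ind = i+1
--     return returnList
--
-- def markov_model(wordList, k):
--     model = {}
--     if wordList == [] or k == 0:
--         return model
--     else:
--         dwList = dollarify(wordList, k)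
--         for i in range(len(dwList)-k):
--             section = dwList[i:i+k]
--             #We must make sure that the keys don't contain punctuations
--             if True in map(lambda x: x[-1] in PUNCTUATION, section):
--                 continue
--             else:
--                 key = tuple(section)
--                 if key not in model:
--                     model[key] = []
--                 model[key] += [dwList[i+k]]
--     return model
-- ===== SOURCE B (Python) =====
-- PUNCTUATION = [".", "!", "?"]
--
-- def markov_model(wordList, k):
--     model = {}
--     if wordList == [] or k == 0:
--         return model
--     # split into complete sentences (trailing words after the last terminator are dropped)
--     sentences = []
--     current = []
--     for w in wordList:
--         current.append(w)
--         if w[-1] in PUNCTUATION: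
--             sentences.append(current)
--             current = []
--     # per sentence: pad with k dollars and slide a window of size k
--     for s in sentences:
--         padded = ['$'] * k + s
--         for j in range(len(padded) - k):
--             model.setdefault(tuple(padded[j:j+k]), []).append(padded[j+k])
--     return model
-- ===== Notes on version B (the rewrite author's own statement) =====
-- stated objective: simpler
-- what changed: B splits the word list into complete sentences once and, per sentence, slides a window over ['$']*k + sentence, so the per-window punctuation rescan and the flat sentinel-padded intermediate list of A disappear.
-- outside the precondition, e.g. on markov_model(['a.', 'b.'], -1): A returns {(): ['a.', 'b.']}, B returns {(): ['a.', 'a.', 'b.', 'b.']}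
import Mathlib
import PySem

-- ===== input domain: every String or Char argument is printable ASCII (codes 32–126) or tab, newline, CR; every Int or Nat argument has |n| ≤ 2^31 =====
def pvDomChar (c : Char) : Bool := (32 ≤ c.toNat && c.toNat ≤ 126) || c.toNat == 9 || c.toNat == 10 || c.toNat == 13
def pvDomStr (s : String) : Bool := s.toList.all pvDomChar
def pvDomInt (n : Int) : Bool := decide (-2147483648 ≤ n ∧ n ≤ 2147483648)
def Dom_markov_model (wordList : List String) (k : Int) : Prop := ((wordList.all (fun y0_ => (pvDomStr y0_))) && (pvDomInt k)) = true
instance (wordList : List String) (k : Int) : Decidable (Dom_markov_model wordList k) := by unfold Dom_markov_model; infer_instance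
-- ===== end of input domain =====

-- B replaces A's flat sentinel-padded list + per-window punctuation rescan by a one-pass split into
-- complete sentences and a per-sentence padded sliding window (objective: simpler).

-- ===== PORT A =====
-- Python's PUNCTUATION list of one-character strings; a one-character Python string is a Char here.
def PUNCTUATION : List Char := ['.', '!', '?']

-- `w[-1] in PUNCTUATION` (used literally by both Pythons); none = IndexError on the empty word
-- (those inputs are outside Pre_markov_model).
def pvIsTerm (w : String) : Bool :=
  match PySem.Str.pyGet? w (-1) with
  | some c => PUNCTUATION.contains c
  | none => false

def dollarify (wordList : List String) (k : Int) : List String :=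
  if wordList = [] ∨ k = 0 then wordList
  else
    ((PySem.List.pyRange 0 (wordList.length : Int) 1).foldl
      (fun (st : List String × Int) i =>
        if pvIsTerm (PySem.List.pyGetD wordList i "") then
          (st.1 ++ List.replicate k.toNat "$" ++ PySem.List.slice wordList (some st.2) (some (i + 1)), i + 1)
        else st)
      ([], 0)).1

def markov_model (wordList : List String) (k : Int) : List (List String × List String) :=
  if wordList = [] ∨ k = 0 then []
  else
    let dwList := dollarify wordList k
    ((PySem.List.pyRange 0 ((dwList.length : Int) - k) 1).foldl
      (fun (model : PySem.Dict (List String) (List String)) i =>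
        let sec := PySem.List.slice dwList (some i) (some (i + k))
        if sec.any pvIsTerm then model   -- `if True in map(lambda x: x[-1] in PUNCTUATION, section): continue`
        else
          let key := sec
          let model := if model.contains key then model else model.insert key []
          model.insert key ((model.getD key []) ++ [PySem.List.pyGetD dwList (i + k) ""]))
      PySem.Dict.empty).items

-- ===== PORT B =====
def markov_model_alt (wordList : List String) (k : Int) : List (List String × List String) :=
  if wordList = [] ∨ k = 0 then []
  else
    let split := wordList.foldl
      (fun (st : List (List String) × List String) w =>
        let current := st.2 ++ [w]
        if pvIsTerm w then (st.1 ++ [current], []) else (st.1, current))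
      ([], [])
    (split.1.foldl
      (fun (model : PySem.Dict (List String) (List String)) s =>
        let padded := List.replicate k.toNat "$" ++ s
        (PySem.List.pyRange 0 ((padded.length : Int) - k) 1).foldl
          (fun (model : PySem.Dict (List String) (List String)) j =>
            let key := PySem.List.slice padded (some j) (some (j + k))
            if model.contains key then
              model.insert key ((model.getD key []) ++ [PySem.List.pyGetD padded (j + k) ""])
            else
              model.insert key [PySem.List.pyGetD padded (j + k) ""])
          model)
      PySem.Dict.empty).items

-- ===== PRECONDITION & SPEC =====
-- Pre_ restricts to the task's natural domain k ≥ 0 (for negative k A's negative slices and indices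
-- wrap around Python-style, which no caller of a k-gram model wants), and excludes empty-string
-- words, on which A raises IndexError (w[-1]) whenever it reaches the scanning loop.
def Pre_markov_model (wordList : List String) (k : Int) : Prop :=
  0 ≤ k ∧ (wordList = [] ∨ k = 0 ∨ "" ∉ wordList)
instance (wordList : List String) (k : Int) : Decidable (Pre_markov_model wordList k) := by
  unfold Pre_markov_model; infer_instance

def pvWitness_markov_model : List String × Int := (["we", "are", "here.", "go!", "now"], 2)

def Spec_markov_model (wordList : List String) (k : Int) (out : List (List String × List String)) : Prop := out = markov_model_alt wordList k
instance (wordList : List String) (k : Int) (out : List (List String × List String)) : Decidable (Spec_markov_model wordList k out) := by unfold Spec_markov_model; infer_instance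

-- ===== CLAIM (what is proved, stated in full; the proofs are below) =====
def Claim_equal_markov_model : Prop := ∀ (wordList : List String) (k : Int), Dom_markov_model wordList k → Pre_markov_model wordList k → Spec_markov_model wordList k (markov_model wordList k)

-- ===== LEMMAS AND PROOFS =====

-- complete sentences of a word list: split after every terminal word, drop the unfinished tail
def csents : List String → List (List String)
  | [] => []
  | w :: t =>
    if pvIsTerm w then [w] :: csents t
    else
      match csents t with
      | [] => []
      | s :: ss => (w :: s) :: ss

theorem csents_nil_of_all (u : List String) (hu : ∀ w ∈ u, pvIsTerm w = false) :
    csents u = [] := by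
  induction u with
  | nil => rfl
  | cons w t ih =>
    simp only [csents, hu w (by simp)]
    rw [ih (fun x hx => hu x (by simp [hx]))]
    simp

theorem csents_split (u : List String) (hu : ∀ w ∈ u, pvIsTerm w = false)
    (t : String) (ht : pvIsTerm t = true) (rest : List String) :
    csents (u ++ t :: rest) = (u ++ [t]) :: csents rest := by
  induction u with
  | nil => simp [csents, ht]
  | cons w u' ih =>
    have hw : pvIsTerm w = false := hu w (by simp)
    simp only [List.cons_append, csents, hw, Bool.false_eq_true, if_false]
    rw [ih (fun x hx => hu x (by simp [hx]))]

-- every complete sentence is nonterminal words followed by one terminal word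
def SentOK (s : List String) : Prop :=
  ∃ u t, s = u ++ [t] ∧ (∀ w ∈ u, pvIsTerm w = false) ∧ pvIsTerm t = true

theorem csents_ok (wl : List String) : ∀ s ∈ csents wl, SentOK s := by
  induction wl with
  | nil => simp [csents]
  | cons w t ih =>
    intro s hs
    simp only [csents] at hs
    by_cases hw : pvIsTerm w
    · simp [hw] at hs
      rcases hs with h | h
      · exact ⟨[], w, by simp [h], by simp, hw⟩
      · exact ih s h
    · simp [hw] at hs
      rcases hcs : csents t with _ | ⟨s0, ss⟩
      · rw [hcs] at hs; simp at hs
      · rw [hcs] at hs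
        simp at hs
        rcases hs with h | h
        · rcases ih s0 (by rw [hcs]; simp) with ⟨u, tt, he, hu, ht⟩
          refine ⟨w :: u, tt, by simp [h, he], ?_, ht⟩
          intro x hx
          rcases List.mem_cons.mp hx with hx | hx
          · simpa [hx] using (by simpa using hw : pvIsTerm w = false)
          · exact hu x hx
        · exact ih s (by rw [hcs]; simp [h])

theorem B_split (wl : List String) :
    ∀ (done : List (List String)) (cur : List String),
      (wl.foldl
        (fun (st : List (List String) × List String) w =>
          let current := st.2 ++ [w]
          if pvIsTerm w then (st.1 ++ [current], []) else (st.1, current))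
        (done, cur)).1
      = done ++ (match csents wl with
                 | [] => []
                 | s :: ss => (cur ++ s) :: ss) := by
  induction wl with
  | nil => simp [csents]
  | cons w t ih =>
    intro done cur
    simp only [List.foldl_cons]
    by_cases hw : pvIsTerm w = true
    · simp only [hw, if_true]
      rw [ih]
      simp only [csents, hw, if_true]
      cases csents t <;> simp
    · simp only [hw]
      rw [ih]
      simp only [csents, hw]
      cases csents t <;> simp

theorem dloop (wl : List String) (k : Int) :
    ∀ (c i ind : Nat) (ret : List String), i + c = wl.length → ind ≤ i →
      (∀ w ∈ (wl.drop ind).take (i - ind), pvIsTerm w = false) →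
      ((PySem.List.pyRange (i : Int) (wl.length : Int) 1).foldl
        (fun (st : List String × Int) j =>
          if pvIsTerm (PySem.List.pyGetD wl j "") then
            (st.1 ++ List.replicate k.toNat "$" ++ PySem.List.slice wl (some st.2) (some (j + 1)), j + 1)
          else st)
        (ret, (ind : Int))).1
      = ret ++ (csents (wl.drop ind)).flatMap (fun s => List.replicate k.toNat "$" ++ s) := by
  intro c
  induction c with
  | zero =>
    intro i ind ret hc hle hnt
    rw [PySem.List.pyRange_one_eq_nil (by omega)]
    have hall : csents (wl.drop ind) = [] := by
      apply csents_nil_of_all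
      intro w hw
      apply hnt
      rwa [List.take_of_length_le (by simp; omega)]
    simp [hall]
  | succ c ih =>
    intro i ind ret hc hle hnt
    have hi : i < wl.length := by omega
    rw [PySem.List.pyRange_one_cons (by exact_mod_cast hi)]
    rw [List.foldl_cons]
    have hget : PySem.List.pyGetD wl (i : Int) "" = wl[i] := by
      simp [PySem.List.pyGetD_natCast, List.getD_eq_getElem?_getD, List.getElem?_eq_getElem hi]
    -- decomposition of the not-yet-flushed suffix
    have hdec : wl.drop ind = (wl.drop ind).take (i - ind) ++ wl[i] :: wl.drop (i + 1) := by
      conv_lhs => rw [← List.take_append_drop (i - ind) (wl.drop ind)]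
      congr 1
      rw [List.drop_drop]
      rw [show ind + (i - ind) = i by omega]
      rw [List.drop_eq_getElem_cons hi]
    have hlenu : ((wl.drop ind).take (i - ind)).length = i - ind := by
      simp; omega
    by_cases ht : pvIsTerm wl[i] = true
    · rw [hget, if_pos ht]
      have hslice : PySem.List.slice wl (some (ind : Int)) (some ((i : Int) + 1))
          = (wl.drop ind).take (i - ind) ++ [wl[i]] := by
        have h1 : ((i : Int) + 1) = ((i + 1 : Nat) : Int) := by push_cast; ring
        rw [h1, PySem.List.slice_natCast]
        conv_lhs => rw [hdec]
        rw [List.take_append, hlenu]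
        rw [List.take_of_length_le (by omega)]
        congr 1
        rw [show i + 1 - ind - (i - ind) = 1 by omega]
        rfl
      rw [hslice]
      have h2 : ((i : Int) + 1) = ((i + 1 : Nat) : Int) := by push_cast; ring
      rw [h2, ih (i + 1) (i + 1) _ (by omega) (le_refl _) (by simp)]
      have hcs : csents (wl.drop ind)
          = ((wl.drop ind).take (i - ind) ++ [wl[i]]) :: csents (wl.drop (i + 1)) := by
        conv_lhs => rw [hdec]
        exact csents_split _ (fun w hw => by
          have := hnt w hw; simpa using this) _ ht _
      rw [hcs]
      simp [List.append_assoc]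
    · rw [hget, if_neg ht]
      rw [show (i : Int) + 1 = ((i + 1 : Nat) : Int) by push_cast; ring]
      rw [ih (i + 1) ind ret (by omega) (by omega) ?_]
      intro w hw
      have hext : (wl.drop ind).take (i + 1 - ind)
          = (wl.drop ind).take (i - ind) ++ [wl[i]] := by
        conv_lhs => rw [hdec]
        rw [List.take_append, hlenu]
        rw [List.take_of_length_le (by omega)]
        congr 1
        rw [show i + 1 - ind - (i - ind) = 1 by omega]
        rfl
      rw [hext] at hw
      rcases List.mem_append.mp hw with h | h
      · exact hnt w h
      · simp at h
        subst h
        simpa using ht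

theorem dollarify_eq (wl : List String) (k : Int) (hwl : wl ≠ []) (hk : 1 ≤ k) :
    dollarify wl k = (csents wl).flatMap (fun s => List.replicate k.toNat "$" ++ s) := by
  unfold dollarify
  rw [if_neg (by simp [hwl]; omega)]
  have := dloop wl k wl.length 0 0 [] (by omega) (le_refl _) (by simp)
  simpa using this

-- loop bodies of the two ports' window loops, named for the proofs
def ABody (k : Int) (dw : List String) (model : PySem.Dict (List String) (List String)) (i : Int) :
    PySem.Dict (List String) (List String) :=
  let sec := PySem.List.slice dw (some i) (some (i + k))
  if sec.any pvIsTerm then model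
  else
    let key := sec
    let model := if model.contains key then model else model.insert key []
    model.insert key ((model.getD key []) ++ [PySem.List.pyGetD dw (i + k) ""])

def BBody (k : Int) (padded : List String) (model : PySem.Dict (List String) (List String)) (j : Int) :
    PySem.Dict (List String) (List String) :=
  let key := PySem.List.slice padded (some j) (some (j + k))
  if model.contains key then
    model.insert key ((model.getD key []) ++ [PySem.List.pyGetD padded (j + k) ""])
  else
    model.insert key [PySem.List.pyGetD padded (j + k) ""]

theorem pvIsTerm_dollar : pvIsTerm "$" = false := by decide

theorem pv_take_drop {α : Type} (X : List α) (a b : Nat) :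
    (X.drop a).take b = (X.take (a + b)).drop a := by
  rw [List.drop_take]
  congr 1
  omega

theorem pv_foldl_id {α β : Type} (l : List β) (m : α) : l.foldl (fun a _ => a) m = m := by
  induction l generalizing m with
  | nil => rfl
  | cons x t ih => simp [ih]

theorem pv_foldl_shift {α : Type} (f : α → Int → α) (a b : Int) (m : α) :
    (PySem.List.pyRange a b).foldl f m
      = (PySem.List.pyRange 0 (b - a)).foldl (fun acc j => f acc (a + j)) m := by
  rw [PySem.List.pyRange_one a b, PySem.List.pyRange_one 0 (b - a)]
  rw [List.foldl_map, List.foldl_map]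
  simp

-- a window fully inside the padded block: A's step has no terminal word in it, both slices and the
-- predicted word agree, and the two dict updates coincide
theorem step_eq (k : Int) (hk : 1 ≤ k) (u : List String) (t : String)
    (hu : ∀ w ∈ u, pvIsTerm w = false) (_ht : pvIsTerm t = true) (L' : List String)
    (i : Int) (hi0 : 0 ≤ i) (hiL : i < (u.length : Int) + 1)
    (m : PySem.Dict (List String) (List String)) :
    ABody k ((List.replicate k.toNat "$" ++ (u ++ [t])) ++ L') m i
      = BBody k (List.replicate k.toNat "$" ++ (u ++ [t])) m i := by
  have hkn : (k.toNat : Int) = k := Int.toNat_of_nonneg (by omega)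
  obtain ⟨iN, rfl⟩ : ∃ n : Nat, i = (n : Int) := ⟨i.toNat, (Int.toNat_of_nonneg hi0).symm⟩
  have hiN : iN < u.length + 1 := by exact_mod_cast hiL
  set kn := k.toNat with hkndef
  set P := List.replicate kn "$" ++ (u ++ [t]) with hPdef
  have hPlen : P.length = kn + (u.length + 1) := by simp [hPdef]
  have htk : (P ++ L').take (iN + kn) = P.take (iN + kn) := by
    rw [List.take_append, show iN + kn - P.length = 0 by omega]
    simp
  have key_eq : PySem.List.slice (P ++ L') (some (iN : Int)) (some ((iN : Int) + k))
      = PySem.List.slice P (some (iN : Int)) (some ((iN : Int) + k)) := by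
    rw [← hkn, PySem.List.slice_natCast_add, PySem.List.slice_natCast_add]
    rw [pv_take_drop, pv_take_drop, htk]
  have val_eq : PySem.List.pyGetD (P ++ L') ((iN : Int) + k) ""
      = PySem.List.pyGetD P ((iN : Int) + k) "" := by
    rw [← hkn, show (iN : Int) + (kn : Int) = ((iN + kn : Nat) : Int) by push_cast; ring]
    rw [PySem.List.pyGetD_natCast, PySem.List.pyGetD_natCast]
    rw [List.getD_eq_getElem?_getD, List.getD_eq_getElem?_getD,
        List.getElem?_append_left (by omega)]
  have hany : (PySem.List.slice P (some (iN : Int)) (some ((iN : Int) + k))).any pvIsTerm = false := by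
    rw [← hkn, PySem.List.slice_natCast_add, pv_take_drop]
    rw [List.any_eq_false]
    intro x hx
    have hx1 : x ∈ P.take (iN + kn) := List.mem_of_mem_drop hx
    have hP2 : P.take (iN + kn) = (List.replicate kn "$" ++ u).take (iN + kn) := by
      rw [hPdef, ← List.append_assoc, List.take_append,
          show iN + kn - (List.replicate kn "$" ++ u).length = 0 by simp; omega]
      simp
    rw [hP2] at hx1
    have hx2 : x ∈ List.replicate kn "$" ++ u := List.mem_of_mem_take hx1
    rcases List.mem_append.mp hx2 with h | h
    · rw [List.eq_of_mem_replicate h]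
      simp [pvIsTerm_dollar]
    · simp [hu x h]
  show (let sec := PySem.List.slice (P ++ L') (some (iN : Int)) (some ((iN : Int) + k)); _) = _
  unfold ABody BBody
  rw [key_eq, val_eq]
  simp only [hany, Bool.false_eq_true, if_false]
  by_cases hc : m.contains (PySem.List.slice P (some (iN : Int)) (some ((iN : Int) + k))) = true
  · simp only [hc, if_true]
  · simp only [hc, Bool.false_eq_true, if_false]
    rw [PySem.Dict.getD_insert_self, PySem.Dict.insert_insert_self]
    simp

-- a window overlapping the end of the block: it contains the terminal word, so A skips it
theorem step_skip (k : Int) (hk : 1 ≤ k) (u : List String) (t : String)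
    (ht : pvIsTerm t = true) (L' : List String) (hL' : k.toNat ≤ L'.length)
    (i : Int) (hi1 : (u.length : Int) + 1 ≤ i) (hi2 : i < (k.toNat : Int) + ((u.length : Int) + 1))
    (m : PySem.Dict (List String) (List String)) :
    ABody k ((List.replicate k.toNat "$" ++ (u ++ [t])) ++ L') m i = m := by
  have hkn : (k.toNat : Int) = k := Int.toNat_of_nonneg (by omega)
  obtain ⟨iN, rfl⟩ : ∃ n : Nat, i = (n : Int) := ⟨i.toNat, (Int.toNat_of_nonneg (by omega)).symm⟩
  have hiN1 : u.length + 1 ≤ iN := by exact_mod_cast hi1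
  have hiN2 : iN < k.toNat + (u.length + 1) := by exact_mod_cast hi2
  set kn := k.toNat with hkndef
  set L := (List.replicate kn "$" ++ (u ++ [t])) ++ L' with hLdef
  have hLlen : L.length = kn + (u.length + 1) + L'.length := by
    simp [hLdef]
    omega
  have hsl : PySem.List.slice L (some (iN : Int)) (some ((iN : Int) + k)) = (L.drop iN).take kn := by
    rw [← hkn, PySem.List.slice_natCast_add]
  have hlen1 : ((L.drop iN).take kn).length = kn := by
    rw [List.length_take, List.length_drop, hLlen]
    omega
  have hj : kn + u.length - iN < ((L.drop iN).take kn).length := by omega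
  have helem : ((L.drop iN).take kn)[kn + u.length - iN]'hj = t := by
    rw [List.getElem_take, List.getElem_drop]
    have hidx : iN + (kn + u.length - iN) = kn + u.length := by omega
    simp only [hidx]
    rw [List.getElem_of_eq (show L = (List.replicate kn "$" ++ u) ++ ([t] ++ L') by
      rw [hLdef]; simp)]
    rw [List.getElem_append_right (by simp)]
    simp
  have hany : (PySem.List.slice L (some (iN : Int)) (some ((iN : Int) + k))).any pvIsTerm = true := by
    rw [hsl, List.any_eq_true]
    refine ⟨t, ?_, ht⟩
    rw [← helem]
    exact List.getElem_mem hj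
  unfold ABody
  simp only [hany, if_true]

-- a window past the block: A's step on the whole list is its step on the remainder, shifted
theorem step_shift (k : Int) (hk : 1 ≤ k) (P L' : List String) (j : Int) (hj : 0 ≤ j)
    (m : PySem.Dict (List String) (List String)) :
    ABody k (P ++ L') m ((P.length : Int) + j) = ABody k L' m j := by
  have hkn : (k.toNat : Int) = k := Int.toNat_of_nonneg (by omega)
  obtain ⟨jN, rfl⟩ : ∃ n : Nat, j = (n : Int) := ⟨j.toNat, (Int.toNat_of_nonneg hj).symm⟩
  set kn := k.toNat with hkndef
  have hsl : PySem.List.slice (P ++ L') (some ((P.length : Int) + jN)) (some (((P.length : Int) + jN) + k))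
      = PySem.List.slice L' (some (jN : Int)) (some ((jN : Int) + k)) := by
    rw [← hkn, show ((P.length : Int) + jN) = ((P.length + jN : Nat) : Int) by push_cast; ring]
    rw [PySem.List.slice_natCast_add, PySem.List.slice_natCast_add]
    congr 1
    rw [← List.drop_drop, List.drop_left]
  have hval : PySem.List.pyGetD (P ++ L') (((P.length : Int) + jN) + k) ""
      = PySem.List.pyGetD L' ((jN : Int) + k) "" := by
    rw [← hkn, show ((P.length : Int) + jN) + (kn : Int) = ((P.length + (jN + kn) : Nat) : Int) by push_cast; ring,
        show (jN : Int) + (kn : Int) = ((jN + kn : Nat) : Int) by push_cast; ring]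
    rw [PySem.List.pyGetD_natCast, PySem.List.pyGetD_natCast]
    rw [List.getD_eq_getElem?_getD, List.getD_eq_getElem?_getD]
    rw [List.getElem?_append_right (by omega), Nat.add_sub_cancel_left]
  unfold ABody
  rw [hsl, hval]

-- a nonempty tail of padded sentences is at least k.toNat+1 words long
theorem flat_pos (k : Int) (rest : List (List String)) (hok : ∀ s ∈ rest, SentOK s)
    (hne : rest ≠ []) :
    k.toNat + 1 ≤ (rest.flatMap (fun s => List.replicate k.toNat "$" ++ s)).length := by
  cases rest with
  | nil => exact absurd rfl hne
  | cons s2 r2 =>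
    obtain ⟨u, t, hs, -, -⟩ := hok s2 (by simp)
    simp [hs]
    omega

theorem Aloop_core (k : Int) (hk : 1 ≤ k) :
    ∀ (ss : List (List String)), (∀ s ∈ ss, SentOK s) →
    ∀ (m : PySem.Dict (List String) (List String)),
    (PySem.List.pyRange 0 (((ss.flatMap (fun s => List.replicate k.toNat "$" ++ s)).length : Int) - k)).foldl
        (ABody k (ss.flatMap (fun s => List.replicate k.toNat "$" ++ s))) m
      = ss.foldl
          (fun m s =>
            (PySem.List.pyRange 0 (((List.replicate k.toNat "$" ++ s).length : Int) - k)).foldl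
              (BBody k (List.replicate k.toNat "$" ++ s)) m) m := by
  intro ss
  induction ss with
  | nil =>
    intro _ m
    rw [PySem.List.pyRange_one_eq_nil (by simp; omega)]
    simp
  | cons s rest ih =>
    intro hok m
    obtain ⟨u, t, hs, hu, ht⟩ := hok s (by simp)
    subst hs
    have hkn : (k.toNat : Int) = k := Int.toNat_of_nonneg (by omega)
    set kn := k.toNat with hkndef
    set P := List.replicate kn "$" ++ (u ++ [t]) with hPdef
    set L' := rest.flatMap (fun s => List.replicate kn "$" ++ s) with hL'def
    have hflat : (((u ++ [t]) :: rest).flatMap (fun s => List.replicate kn "$" ++ s)) = P ++ L' := by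
      simp [hPdef, hL'def]
    rw [hflat]
    have hPlen : P.length = kn + (u.length + 1) := by simp [hPdef]
    have hbound : ((P ++ L').length : Int) - k = ((u.length : Int) + 1) + (L'.length : Int) := by
      rw [← hkn]
      simp [hPlen]
      omega
    have hBbound : ((P.length : Int)) - k = (u.length : Int) + 1 := by
      rw [← hkn, hPlen]
      push_cast
      ring
    rw [hbound, List.foldl_cons]
    by_cases hrest : rest = []
    · subst hrest
      have hL'nil : L' = [] := by simp [hL'def]
      rw [hL'nil]
      simp only [List.length_nil, Nat.cast_zero, add_zero, List.foldl_nil]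
      rw [← hBbound]
      apply PySem.List.foldl_congr_mem
      intro acc i hi
      rw [PySem.List.mem_pyRange_one, hBbound] at hi
      have := step_eq k hk u t hu ht [] i hi.1 hi.2 acc
      simpa using this
    · have hL'len : kn + 1 ≤ L'.length := flat_pos k rest (fun x hx => hok x (by simp [hx])) hrest
      rw [PySem.List.pyRange_one_append 0 ((u.length : Int) + 1)
            (((u.length : Int) + 1) + (L'.length : Int)) (by omega) (by omega)]
      rw [PySem.List.pyRange_one_append ((u.length : Int) + 1) ((P.length : Int))
            (((u.length : Int) + 1) + (L'.length : Int))
            (by rw [hPlen]; push_cast; omega) (by rw [hPlen]; push_cast; omega)]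
      rw [List.foldl_append, List.foldl_append]
      have hc1 : (PySem.List.pyRange 0 ((u.length : Int) + 1)).foldl (ABody k (P ++ L')) m
          = (PySem.List.pyRange 0 ((P.length : Int) - k)).foldl (BBody k P) m := by
        rw [hBbound]
        apply PySem.List.foldl_congr_mem
        intro acc i hi
        rw [PySem.List.mem_pyRange_one] at hi
        exact step_eq k hk u t hu ht L' i hi.1 hi.2 acc
      have hc2 : ∀ m2, (PySem.List.pyRange ((u.length : Int) + 1) ((P.length : Int))).foldl
            (ABody k (P ++ L')) m2 = m2 := by
        intro m2
        rw [PySem.List.foldl_congr_mem _ _ (fun (a : PySem.Dict (List String) (List String)) (_ : Int) => a) m2 ?_]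
        · exact pv_foldl_id _ _
        · intro acc i hi
          rw [PySem.List.mem_pyRange_one] at hi
          have hi2 : i < (kn : Int) + ((u.length : Int) + 1) := by
            have := hi.2
            rw [hPlen] at this
            push_cast at this
            omega
          exact step_skip k hk u t ht L' (by omega) i hi.1 hi2 acc
      have hc3 : ∀ m3, (PySem.List.pyRange ((P.length : Int))
            (((u.length : Int) + 1) + (L'.length : Int))).foldl (ABody k (P ++ L')) m3
          = (PySem.List.pyRange 0 ((L'.length : Int) - k)).foldl (ABody k L') m3 := by
        intro m3
        rw [pv_foldl_shift]
        rw [show ((u.length : Int) + 1) + (L'.length : Int) - (P.length : Int)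
            = (L'.length : Int) - k by rw [← hkn, hPlen]; push_cast; ring]
        apply PySem.List.foldl_congr_mem
        intro acc j hj
        rw [PySem.List.mem_pyRange_one] at hj
        exact step_shift k hk P L' j hj.1 acc
      rw [hc1, hc2, hc3]
      exact ih (fun x hx => hok x (by simp [hx])) _

-- the A-side window loop over a flattened padded-sentence list equals B's per-sentence loops
theorem Aloop_flat (k : Int) (hk : 1 ≤ k) :
    ∀ (ss : List (List String)), (∀ s ∈ ss, SentOK s) →
    ∀ (m : PySem.Dict (List String) (List String)),
      (PySem.List.pyRange 0 (((ss.flatMap (fun s => List.replicate k.toNat "$" ++ s)).length : Int) - k) 1).foldl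
        (fun (model : PySem.Dict (List String) (List String)) i =>
          let dwList := ss.flatMap (fun s => List.replicate k.toNat "$" ++ s)
          let sec := PySem.List.slice dwList (some i) (some (i + k))
          if sec.any pvIsTerm then model
          else
            let key := sec
            let model := if model.contains key then model else model.insert key []
            model.insert key ((model.getD key []) ++ [PySem.List.pyGetD dwList (i + k) ""]))
        m
      = ss.foldl
          (fun (model : PySem.Dict (List String) (List String)) s =>
            let padded := List.replicate k.toNat "$" ++ s
            (PySem.List.pyRange 0 ((padded.length : Int) - k) 1).foldl
              (fun (model : PySem.Dict (List String) (List String)) j =>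
                let key := PySem.List.slice padded (some j) (some (j + k))
                if model.contains key then
                  model.insert key ((model.getD key []) ++ [PySem.List.pyGetD padded (j + k) ""])
                else
                  model.insert key [PySem.List.pyGetD padded (j + k) ""])
              model)
          m := by
  intro ss hss m
  exact Aloop_core k hk ss hss m


-- ===== VERDICT (by name: the statement is the Claim_ definition above) =====
theorem markov_model_spec : Claim_equal_markov_model := by
  intro wl k _hdom hpre
  unfold Spec_markov_model markov_model markov_model_alt
  by_cases hbase : wl = [] ∨ k = 0
  · simp [hbase]
  · have hwl : wl ≠ [] := fun h => hbase (Or.inl h)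
    have hk0 : k ≠ 0 := fun h => hbase (Or.inr h)
    have hk : 1 ≤ k := lt_of_le_of_ne hpre.1 (Ne.symm hk0)
    have hA := Aloop_flat k hk (csents wl) (csents_ok wl) PySem.Dict.empty
    rw [if_neg hbase, if_neg hbase]
    simp only [dollarify_eq wl k hwl hk, B_split wl [] [], List.nil_append]
    rcases hcs : csents wl with _ | ⟨s0, ss⟩
    · rw [hcs] at hA
      simp only [List.flatMap_nil] at hA ⊢
      rw [hA]
    · rw [hcs] at hA
      rw [hA]
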